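-- pv_equiv track=rewrite | github.com/IvayloValkov/Python_Fundamentals | Functions/10_array_manipulator.py | min_even
-- ===== SOURCE A (Python) =====
-- def min_even(array):
--     min_int = max(array)
--     index = -1
--
--     for i in range(0, len(array)):
--         if array[i] <= min_int and array[i] % 2 == 0:
--             min_int = array[i]
--             index = i
--
--     return index
-- ===== SOURCE B (Python) =====
-- def min_even(array):
--     evens = [x for x in array if x % 2 == 0]
--     if not evens:
--         return -1
--     target = min(evens)
--     return len(array) - 1 - array[::-1].index(target)
-- ===== Notes on version B (the rewrite author's own statement) =====
-- stated objective: alternative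
-- what changed: A's single fused scan (running max-seeded minimum with index updates) is replaced by a filter of the evens, a min over them, and a locate of the last occurrence via a reversed-list index.
import Mathlib
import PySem

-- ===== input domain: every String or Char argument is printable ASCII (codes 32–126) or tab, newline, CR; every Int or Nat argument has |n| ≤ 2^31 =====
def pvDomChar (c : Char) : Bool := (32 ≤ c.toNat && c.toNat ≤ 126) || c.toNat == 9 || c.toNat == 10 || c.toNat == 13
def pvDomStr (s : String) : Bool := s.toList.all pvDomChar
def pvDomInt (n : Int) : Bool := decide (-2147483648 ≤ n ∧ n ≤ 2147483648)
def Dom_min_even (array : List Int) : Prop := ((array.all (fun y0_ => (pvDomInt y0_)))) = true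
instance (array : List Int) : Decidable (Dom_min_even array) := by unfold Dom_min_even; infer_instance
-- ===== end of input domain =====

-- B replaces A's single fused scan by filter-evens → min → locate last occurrence via a reversed index (alternative decomposition, same cost).
-- A raises ValueError on the empty list (excluded by Pre_); B returns -1 there.

-- ===== PORT A =====
def min_even (array : List Int) : Int :=
  match PySem.List.max? array (fun x => x) with
  | none => -1  -- Python raises ValueError here (empty array); excluded by Pre_
  | some m =>
    ((PySem.List.pyRange 0 (array.length : Int) 1).foldl
      (fun (s : Int × Int) i =>
        let x := PySem.List.pyGetD array i 0   -- i is in range, so pyGetD is exact for array[i]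
        if x ≤ s.1 && PySem.Int.mod x 2 == 0 then (x, i) else s)
      (m, -1)).2

-- ===== PORT B =====
def min_even_alt (array : List Int) : Int :=
  let evens := array.filter (fun x => PySem.Int.mod x 2 == 0)
  match PySem.List.min? evens (fun x => x) with
  | none => -1
  | some target =>
    match (PySem.List.slice? array none none (-1)).bind
            (fun r => PySem.List.index? r target) with
    | some k => (array.length : Int) - 1 - (k : Int)
    | none => -1  -- unreachable: target is an element of array

-- ===== PRECONDITION & SPEC =====
def Pre_min_even (array : List Int) : Prop := array ≠ []
instance (array : List Int) : Decidable (Pre_min_even array) := by unfold Pre_min_even; infer_instance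
def pvWitness_min_even : List Int := [3, 4, 2, 2, 7]

def Spec_min_even (array : List Int) (out : Int) : Prop := out = min_even_alt array
instance (array : List Int) (out : Int) : Decidable (Spec_min_even array out) := by unfold Spec_min_even; infer_instance

-- ===== CLAIM =====
def Claim_equal_min_even : Prop := ∀ (array : List Int), Dom_min_even array → Pre_min_even array → Spec_min_even array (min_even array)

-- ===== LEMMAS AND PROOFS =====

def stepA (s : Int × Int) (p : Int × Int) : Int × Int :=
  if p.2 ≤ s.1 && PySem.Int.mod p.2 2 == 0 then (p.2, p.1) else s

def evres (l : List Int) (init : Int) : Int × Int :=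
  match l.filter (fun x => PySem.Int.mod x 2 == 0) with
  | [] => (init, -1)
  | e :: es => (es.foldl min e,
      (l.length : Int) - 1 - (((PySem.List.index? l.reverse (es.foldl min e)).getD 0 : Nat) : Int))

theorem minEven_in_filter (l : List Int) (e : Int) (es : List Int)
    (hfe : l.filter (fun x => PySem.Int.mod x 2 == 0) = e :: es) :
    es.foldl min e ∈ l.filter (fun x => PySem.Int.mod x 2 == 0) := by
  rw [hfe]
  rcases PySem.List.foldl_min_mem es e with h1 | h1
  · rw [h1]; exact List.mem_cons_self
  · exact List.mem_cons_of_mem _ h1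

theorem loopA_char (l : List Int) (init : Int) (h : ∀ x ∈ l, x ≤ init) :
    (PySem.List.enumerate l 0).foldl stepA (init, -1) = evres l init := by
  induction l using List.reverseRecOn with
  | nil => simp [evres, PySem.List.enumerate_nil]
  | append_singleton l x ih =>
    have hl : ∀ y ∈ l, y ≤ init := fun y hy => h y (List.mem_append_left _ hy)
    rw [PySem.List.enumerate_append, List.foldl_append, ih hl]
    simp only [PySem.List.enumerate_cons, PySem.List.enumerate_nil, List.foldl_cons,
      List.foldl_nil, zero_add]
    cases hfe : l.filter (fun x => PySem.Int.mod x 2 == 0) with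
    | nil =>
      by_cases hx : PySem.Int.mod x 2 = 0
      · have hxi : x ≤ init := h x (by simp)
        unfold evres
        rw [List.filter_append, hfe]
        simp only [List.filter_cons, List.filter_nil, hx, beq_self_eq_true, if_true,
          List.nil_append, List.foldl_nil, List.reverse_append, List.reverse_singleton,
          List.singleton_append]
        rw [PySem.List.index?_cons_self]
        simp only [stepA, Option.getD_some]
        rw [if_pos (by simp [hxi, (PySem.Int.mod_eq_zero_iff_dvd x 2).mp hx])]
        simp
      · have hxb : (PySem.Int.mod x 2 == 0) = false := by simp only [beq_eq_false_iff_ne, ne_eq]; exact hx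
        unfold evres
        rw [List.filter_append, hfe]
        simp only [List.filter_cons, List.filter_nil, hxb, Bool.false_eq_true, if_false,
          List.nil_append, stepA, Bool.and_false]
    | cons e es =>
      have hmf := minEven_in_filter l e es hfe
      have hmmem : es.foldl min e ∈ l := List.mem_of_mem_filter hmf
      have hmeven : (PySem.Int.mod (es.foldl min e) 2 == 0) = true := (List.mem_filter.mp hmf).2
      obtain ⟨k, hk⟩ : ∃ k, PySem.List.index? l.reverse (es.foldl min e) = some k :=
        Option.isSome_iff_exists.mp ((PySem.List.index?_isSome_iff _ _).mpr (by simpa using hmmem))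
      have hklt : k < l.length := by
        obtain ⟨hk', _⟩ := PySem.List.getElem_of_index?_eq_some hk
        simpa using hk'
      by_cases hx : PySem.Int.mod x 2 = 0
      · unfold evres
        rw [List.filter_append, hfe]
        simp only [List.filter_cons, List.filter_nil, hx, beq_self_eq_true, if_true,
          List.cons_append, List.reverse_append, List.reverse_singleton,
          List.nil_append]
        by_cases hle : x ≤ es.foldl min e
        · have hmin : (es ++ [x]).foldl min e = x := by
            rw [List.foldl_append]; simp [min_eq_right hle]
          rw [hmin, PySem.List.index?_cons_self, hk]
          simp only [stepA, Option.getD_some]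
          rw [if_pos (by simp [hle, (PySem.Int.mod_eq_zero_iff_dvd x 2).mp hx])]
          simp
        · have hne : x ≠ es.foldl min e := fun hq => hle (le_of_eq hq)
          have hmin : (es ++ [x]).foldl min e = es.foldl min e := by
            rw [List.foldl_append]; simp [min_eq_left (le_of_not_ge hle)]
          rw [hmin, PySem.List.index?_cons_of_ne _ hne, hk]
          simp only [stepA, Option.map_some, Option.getD_some]
          rw [if_neg (by simp [hle])]
          refine Prod.ext rfl ?_
          simp only [List.length_append, List.length_singleton]
          push_cast
          ring
      · have hxb : (PySem.Int.mod x 2 == 0) = false := by simp only [beq_eq_false_iff_ne, ne_eq]; exact hx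
        have hne : x ≠ es.foldl min e := fun hq => hx (by simpa [hq] using hmeven)
        unfold evres
        rw [List.filter_append, hfe]
        simp only [List.filter_cons, List.filter_nil, hxb, Bool.false_eq_true, if_false,
          List.append_nil, List.reverse_append, List.reverse_singleton, List.singleton_append]
        rw [PySem.List.index?_cons_of_ne _ hne, hk]
        simp only [stepA, hxb, Bool.and_false, Option.map_some, Option.getD_some,
          Bool.false_eq_true, if_false]
        refine Prod.ext rfl ?_
        simp only [List.length_append, List.length_singleton]
        push_cast
        ring

theorem fold_conv (array : List Int) (s0 : Int × Int) :
    (PySem.List.pyRange 0 (array.length : Int) 1).foldl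
      (fun (s : Int × Int) i =>
        let x := PySem.List.pyGetD array i 0
        if x ≤ s.1 && PySem.Int.mod x 2 == 0 then (x, i) else s) s0
    = (PySem.List.enumerate array 0).foldl stepA s0 := by
  rw [PySem.List.enumerate_eq_map_pyRange (d := 0), List.foldl_map]
  rfl

theorem min_even_spec : Claim_equal_min_even := by
  intro array _ hpre
  unfold Spec_min_even min_even min_even_alt
  cases hmax : PySem.List.max? array (fun x => x) with
  | none => exact absurd ((PySem.List.max?_eq_none_iff _ _).mp hmax) hpre
  | some m =>
    have hbound : ∀ y ∈ array, y ≤ m := fun y hy => PySem.List.max?_isMax hmax y hy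
    dsimp only
    rw [fold_conv, loopA_char array m hbound]
    rw [PySem.List.slice?_none_none_neg_one]
    simp only [Option.bind_some]
    unfold evres
    cases hfe : array.filter (fun x => PySem.Int.mod x 2 == 0) with
    | nil => rw [(PySem.List.min?_eq_none_iff _ _).mpr rfl]
    | cons e es =>
      rw [PySem.List.min?_id_cons]
      have hmmem : es.foldl min e ∈ array := List.mem_of_mem_filter (minEven_in_filter array e es hfe)
      obtain ⟨k, hk⟩ : ∃ k, PySem.List.index? array.reverse (es.foldl min e) = some k :=
        Option.isSome_iff_exists.mp
          ((PySem.List.index?_isSome_iff _ _).mpr (by simpa using hmmem))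
      dsimp only
      rw [hk]
      rfl
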